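-- pv_equiv track=rewrite | github.com/linhdvu14/cp-sols | sols/CodeForces/1848_d2/C_Vika_and_Price_Tags.py | solve
-- ===== SOURCE A (Python) =====
-- def solve(N, A, B):
--     def f(a, b):
--         res = 0
--         while b:
--             if a < b:
--                 res += 1
--                 a, b = b, b - a
--             else:
--                 n, r = divmod(a, b)
--                 if n & 1:
--                     res += 1
--                     a, b = b, r
--                 else:
--                     a, b = r, b
--         return res % 3
--
--     par = -1
--     for a, b in zip(A, B):
--         if a == b == 0: continue
--         p = f(a, b)
--         if par == -1: par = p
--         elif par != p: return 'NO'
--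
--     return 'YES'
-- ===== SOURCE B (Python) =====
-- def solve(N, A, B):
--     def g(a, b):
--         if b == 0:
--             return 0
--         if a < b:
--             return (1 + g(b, b - a)) % 3
--         n, r = divmod(a, b)
--         if n & 1:
--             return (1 + g(b, r)) % 3
--         return g(r, b)
--
--     ps = (g(a, b) for a, b in zip(A, B) if (a, b) != (0, 0))
--     first = next(ps, None)
--     return 'YES' if all(p == first for p in ps) else 'NO'
-- ===== Notes on version B (the rewrite author's own statement) =====
-- stated objective: alternative
-- what changed: The inner while-loop with a mutable res accumulator becomes a pure recursion that takes mod 3 at every level (valid since addition mod 3 is associative), and the outer sentinel loop with early 'NO' return is replaced by collecting all invariant values into a list and checking they are all equal to the first.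
import Mathlib
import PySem

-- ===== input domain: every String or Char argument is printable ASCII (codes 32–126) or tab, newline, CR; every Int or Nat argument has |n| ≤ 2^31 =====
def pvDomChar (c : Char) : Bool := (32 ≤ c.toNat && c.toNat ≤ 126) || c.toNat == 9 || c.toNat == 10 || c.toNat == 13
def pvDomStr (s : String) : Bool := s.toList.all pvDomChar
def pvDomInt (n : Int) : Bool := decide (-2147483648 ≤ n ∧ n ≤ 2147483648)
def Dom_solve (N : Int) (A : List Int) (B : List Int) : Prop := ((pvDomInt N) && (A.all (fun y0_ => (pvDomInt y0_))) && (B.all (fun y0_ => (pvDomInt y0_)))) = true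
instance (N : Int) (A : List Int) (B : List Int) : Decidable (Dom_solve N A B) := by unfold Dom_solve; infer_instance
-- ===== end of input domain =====

-- B replaces the mutable while-loop accumulator of f by a pure recursion taking mod 3 at
-- every level, and the sentinel-driven outer loop by collecting the invariant values and
-- checking they are all equal (objective: alternative decomposition, same cost).

-- ===== PORT A =====
-- Inner while-loop of f, with a fuel counter that only makes the recursion total; on every
-- input with |values| ≤ 2^31 on which the Python loop terminates, fewer than 10000 steps
-- are taken, so the fuel is never exhausted there.  Both ports use the same fuel guard.
-- Python 'n & 1' is ported as 'n % 2 = 1' (PySem.Int.mod): exact for every int,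
-- since n & 1 equals Python's n % 2 on all integers.
def solveF : Nat → Int → Int → Int → Int
  | 0, res, _, _ => PySem.Int.mod res 3
  | fuel + 1, res, a, b =>
    if b ≠ 0 then
      if a < b then solveF fuel (res + 1) b (b - a)
      else
        let n := PySem.Int.floordiv a b
        let r := PySem.Int.mod a b
        if PySem.Int.mod n 2 = 1 then solveF fuel (res + 1) b r
        else solveF fuel res r b
    else PySem.Int.mod res 3

def solveLoop : List (Int × Int) → Int → String
  | [], _ => "YES"
  | ab :: rest, par =>
    if ab.1 = 0 ∧ ab.2 = 0 then solveLoop rest par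
    else
      let p := solveF (10000) 0 ab.1 ab.2
      if par = -1 then solveLoop rest p
      else if par ≠ p then "NO"
      else solveLoop rest par

def solve (N : Int) (A : List Int) (B : List Int) : String :=
  solveLoop (A.zip B) (-1)

-- ===== PORT B =====
-- Recursive g, with the same totality fuel.
def solveG : Nat → Int → Int → Int
  | 0, _, _ => 0
  | fuel + 1, a, b =>
    if b = 0 then 0
    else if a < b then PySem.Int.mod (1 + solveG fuel b (b - a)) 3
    else
      let n := PySem.Int.floordiv a b
      let r := PySem.Int.mod a b
      if PySem.Int.mod n 2 = 1 then PySem.Int.mod (1 + solveG fuel b r) 3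
      else solveG fuel r b

-- the generator 'all(p == first for p in ps)': a short-circuiting scan of the remaining pairs
def altAll (first : Int) : List (Int × Int) → Bool
  | [] => true
  | ab :: rest => if solveG 10000 ab.1 ab.2 == first then altAll first rest else false

def solve_alt (N : Int) (A : List Int) (B : List Int) : String :=
  match (A.zip B).filter (fun ab => !(ab.1 == 0 && ab.2 == 0)) with
  | [] => "YES"
  | ab :: rest =>
    let first := solveG 10000 ab.1 ab.2
    if altAll first rest then "YES" else "NO"

-- ===== PRECONDITION & SPEC =====
def Spec_solve (N : Int) (A : List Int) (B : List Int) (out : String) : Prop := out = solve_alt N A B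
instance (N : Int) (A : List Int) (B : List Int) (out : String) : Decidable (Spec_solve N A B out) := by unfold Spec_solve; infer_instance

-- ===== CLAIM (what is proved, stated in full; the proofs are below) =====
def Claim_equal_solve : Prop := ∀ (N : Int) (A : List Int) (B : List Int), Dom_solve N A B → Spec_solve N A B (solve N A B)

-- ===== LEMMAS AND PROOFS =====

-- g always lands in [0, 3)
theorem solveG_range (fuel : Nat) : ∀ a b : Int, 0 ≤ solveG fuel a b ∧ solveG fuel a b < 3 := by
  induction fuel with
  | zero => intro a b; simp [solveG]
  | succ n ih =>
    intro a b
    simp only [solveG]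
    split_ifs with h1 h2 h3
    · norm_num
    · rw [PySem.Int.mod_eq_emod_of_pos (show (0:Int) < 3 by norm_num)]; omega
    · rw [PySem.Int.mod_eq_emod_of_pos (show (0:Int) < 3 by norm_num)]; omega
    · exact ih _ _

-- the loop body of A equals res + g, mod 3 (for every fuel, including exhaustion)
theorem solveF_eq_g (fuel : Nat) : ∀ res a b : Int,
    solveF fuel res a b = PySem.Int.mod (res + solveG fuel a b) 3 := by
  induction fuel with
  | zero => intro res a b; simp [solveF, solveG]
  | succ n ih =>
    intro res a b
    simp only [solveF, solveG]
    by_cases hb : b = 0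
    · simp [hb]
    · simp only [hb, if_neg, ne_eq, not_false_eq_true, if_true]
      by_cases hab : a < b
      · rw [if_pos hab, if_pos hab, ih]
        rw [PySem.Int.mod_eq_emod_of_pos (by norm_num),
            PySem.Int.mod_eq_emod_of_pos (by norm_num),
            PySem.Int.mod_eq_emod_of_pos (by norm_num)]
        omega
      · rw [if_neg hab, if_neg hab]
        by_cases hodd : PySem.Int.mod (PySem.Int.floordiv a b) 2 = 1
        · rw [if_pos hodd, if_pos hodd, ih]
          rw [PySem.Int.mod_eq_emod_of_pos (show (0:Int) < 3 by norm_num),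
              PySem.Int.mod_eq_emod_of_pos (show (0:Int) < 3 by norm_num),
              PySem.Int.mod_eq_emod_of_pos (show (0:Int) < 3 by norm_num)]
          omega
        · rw [if_neg hodd, if_neg hodd, ih]

theorem solveF_zero_eq_g (a b : Int) : solveF (10000) 0 a b = solveG (10000) a b := by
  rw [solveF_eq_g]
  have h := solveG_range (10000) a b
  rw [PySem.Int.mod_eq_emod_of_pos (by norm_num)]
  omega

-- the filtered pair list both programs effectively walk
def pairsF (l : List (Int × Int)) : List (Int × Int) :=
  l.filter (fun ab => !(ab.1 == 0 && ab.2 == 0))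

theorem pairsF_cons_skip (ab : Int × Int) (rest : List (Int × Int))
    (h1 : ab.1 = 0) (h2 : ab.2 = 0) : pairsF (ab :: rest) = pairsF rest := by
  unfold pairsF
  rw [List.filter_cons_of_neg (by simp [h1, h2])]

theorem pairsF_cons_keep (ab : Int × Int) (rest : List (Int × Int))
    (h : ¬(ab.1 = 0 ∧ ab.2 = 0)) : pairsF (ab :: rest) = ab :: pairsF rest := by
  unfold pairsF
  rw [List.filter_cons_of_pos]
  simp only [Bool.not_eq_eq_eq_not, Bool.not_true, Bool.and_eq_false_iff, beq_eq_false_iff_ne]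
  by_cases h1 : ab.1 = 0
  · exact Or.inr (fun h2 => h ⟨h1, h2⟩)
  · exact Or.inl h1

theorem loop_par (l : List (Int × Int)) : ∀ par : Int, par ≠ -1 →
    solveLoop l par = if altAll par (pairsF l) then "YES" else "NO" := by
  induction l with
  | nil => intro par _; simp [solveLoop, pairsF, altAll]
  | cons ab rest ih =>
    intro par hpar
    by_cases hz : ab.1 = 0 ∧ ab.2 = 0
    · rw [solveLoop, if_pos hz, ih par hpar, pairsF_cons_skip ab rest hz.1 hz.2]
    · rw [solveLoop, if_neg hz, if_neg hpar, pairsF_cons_keep ab rest hz, altAll,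
          solveF_zero_eq_g]
      by_cases hne : par = solveG 10000 ab.1 ab.2
      · rw [if_neg (by simp [hne]), ih par hpar]
        simp [hne]
      · have hbe : (solveG 10000 ab.1 ab.2 == par) = false := by
          simp only [beq_eq_false_iff_ne]
          exact fun h => hne h.symm
        rw [if_pos hne]
        simp [hbe]

theorem loop_start (l : List (Int × Int)) :
    solveLoop l (-1) =
      (match pairsF l with
       | [] => "YES"
       | ab :: rest =>
         if altAll (solveG 10000 ab.1 ab.2) rest then "YES" else "NO") := by
  induction l with
  | nil => simp [solveLoop, pairsF]
  | cons ab rest ih =>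
    by_cases hz : ab.1 = 0 ∧ ab.2 = 0
    · rw [solveLoop, if_pos hz, ih, pairsF_cons_skip ab rest hz.1 hz.2]
    · rw [solveLoop, if_neg hz, if_pos rfl, pairsF_cons_keep ab rest hz, solveF_zero_eq_g,
          loop_par rest _ (by have := solveG_range 10000 ab.1 ab.2; omega)]

-- ===== VERDICT (by name: the statement is the Claim_ definition above) =====
theorem solve_spec : Claim_equal_solve := by
  intro N A B _
  unfold Spec_solve solve solve_alt
  rw [loop_start]
  rfl
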